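-- pv_equiv track=rewrite | github.com/asabdulkareem/MODULE-5-IntroductiontoProblemSolving-Intermediate-2 | Python/src/day46/Exercise.py | ex3FactorsSort
-- ===== SOURCE A (Python) =====
-- from functools import cmp_to_key
--
-- def ex3FactorsSort(arr):
--     def countFactors(num):
--         count = 0
--         i = 1
--         while i * i <= num:
--             if (num % i == 0):
--                 count += 1
--                 if (i * i != num):
--                     count += 1
--             i += 1
--         return count
--     def compare(x, y):
--         count1 = countFactors(x)
--         count2 = countFactors(y)
--         if count1 == count2:
--             return x - y
--         return count1 - count2
--     arr.sort(key=cmp_to_key(compare))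
--     return arr
-- ===== SOURCE B (Python) =====
-- def ex3FactorsSort(arr):
--     # Divisor count via the multiplicative formula prod(e_i + 1) over the prime
--     # factorization (trial division that shrinks n), then one stable key-sort.
--     def numDivisors(n):
--         if n <= 0:
--             return 0
--         total = 1
--         d = 2
--         while d * d <= n:
--             e = 0
--             while n % d == 0:
--                 n //= d
--                 e += 1
--             total *= e + 1
--             d += 1
--         if n > 1:
--             total *= 2
--         return total
--     arr.sort(key=lambda x: (numDivisors(x), x))
--     return arr
-- ===== Notes on version B (the rewrite author's own statement) =====
-- stated objective: faster
-- what changed: Replaces the cmp_to_key comparator (which re-runs an O(sqrt n) symmetric-pair divisor count twice per comparison) by a single stable key-sort on (d(x), x), where d(x) is computed once per element via the multiplicative formula prod(e_i+1) over a trial-division prime factorization that shrinks n as factors are stripped.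
import Mathlib
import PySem

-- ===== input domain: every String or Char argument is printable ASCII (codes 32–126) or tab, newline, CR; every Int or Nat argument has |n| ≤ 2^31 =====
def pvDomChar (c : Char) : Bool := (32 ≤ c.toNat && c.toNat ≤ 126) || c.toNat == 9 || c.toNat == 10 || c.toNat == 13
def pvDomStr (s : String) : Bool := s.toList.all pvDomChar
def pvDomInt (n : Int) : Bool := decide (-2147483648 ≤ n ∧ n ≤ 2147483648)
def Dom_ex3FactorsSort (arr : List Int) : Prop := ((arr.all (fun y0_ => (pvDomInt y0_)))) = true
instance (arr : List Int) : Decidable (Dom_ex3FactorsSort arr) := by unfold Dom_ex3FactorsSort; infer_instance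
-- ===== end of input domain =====

-- B replaces A's cmp_to_key comparator (divisor count recomputed twice per comparison by the
-- symmetric-pair sqrt loop) with one stable key-sort on (d(x), x), d(x) computed once per element
-- by the multiplicative formula over a shrinking trial-division factorization; measurably faster.
-- A and B both sort arr in place in Python; the equivalence proved here is about the return value.

-- ===== PORT A =====
-- termination helper for cfLoop (cited by its decreasing_by)
theorem cfLoop_dec (num i : Int) (h : i * i ≤ num) :
    (num + 1 - (i + 1)).toNat < (num + 1 - i).toNat := by
  have h1 := mul_self_nonneg i
  have h2 : i * 1 ≤ i * i ∨ i ≤ 0 := by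
    rcases (by omega : 1 ≤ i ∨ i ≤ 0) with hi | hi
    · exact Or.inl (mul_le_mul_of_nonneg_left hi (by omega))
    · exact Or.inr hi
  exact (Int.toNat_lt_toNat (by omega)).mpr (by omega)

-- while i * i <= num: (count bookkeeping) ; i += 1
def cfLoop (num count i : Int) : Int :=
  if h : i * i ≤ num then
    cfLoop num
      (if PySem.Int.mod num i = 0 then
        (let count := count + 1
         if i * i ≠ num then count + 1 else count)
       else count)
      (i + 1)
  else count
termination_by (num + 1 - i).toNat
decreasing_by exact cfLoop_dec num i h

def countFactors (num : Int) : Int := cfLoop num 0 1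

def cfCompare (x y : Int) : Int :=
  let count1 := countFactors x
  let count2 := countFactors y
  if count1 = count2 then x - y else count1 - count2

-- arr.sort(key=cmp_to_key(compare)): CPython's stable sort, modeled (as PySem models every
-- Python sort) by the stable insertion-sort fold, with 'a goes before b' ↔ compare a b < 0.
def ex3FactorsSort (arr : List Int) : List Int :=
  arr.foldl (fun acc x => PySem.List.insertBy (fun a b => decide (cfCompare a b < 0)) x acc) []

-- ===== PORT B =====
-- termination helper for stripLoop (cited by its decreasing_by)
theorem stripLoop_dec (n d : Int)
    (h : PySem.Int.mod n d = 0 ∧ 1 ≤ n ∧ 2 ≤ d) :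
    (PySem.Int.floordiv n d).toNat < n.toNat := by
  obtain ⟨h1, h2, h3⟩ := h
  rw [PySem.Int.floordiv_eq_ediv_of_pos (by omega)]
  have h4 : n / d < n := by
    rw [Int.ediv_lt_iff_lt_mul (by omega)]
    have := mul_le_mul_of_nonneg_left h3 (by omega : (0:Int) ≤ n)
    omega
  exact (Int.toNat_lt_toNat (by omega)).mpr h4

-- inner loop: e = 0 ; while n % d == 0: n //= d ; e += 1   (returns the final (n, e));
-- the conjuncts 1 ≤ n ∧ 2 ≤ d are totality guards only: they hold on every call Source B makes.
def stripLoop (n d e : Int) : Int × Int :=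
  if h : PySem.Int.mod n d = 0 ∧ 1 ≤ n ∧ 2 ≤ d then
    stripLoop (PySem.Int.floordiv n d) d (e + 1)
  else (n, e)
termination_by n.toNat
decreasing_by exact stripLoop_dec n d h

-- termination helper for ndLoop (cited by its decreasing_by)
theorem stripLoop_fst_le (n d e : Int) : (stripLoop n d e).1 ≤ n := by
  fun_induction stripLoop n d e
  case case1 n e h ih =>
    obtain ⟨h1, h2, h3⟩ := h
    have hd : PySem.Int.floordiv n d ≤ n := by
      rw [PySem.Int.floordiv_eq_ediv_of_pos (by omega)]
      exact Int.ediv_le_self d (by omega)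
    omega
  case case2 => simp

-- termination helper for ndLoop (cited by its decreasing_by)
theorem ndLoop_dec (n d : Int) (h : d * d ≤ n) :
    ((stripLoop n d 0).1 + 1 - (d + 1)).toNat < (n + 1 - d).toNat := by
  have h1 := mul_self_nonneg d
  have h2 : d * 1 ≤ d * d ∨ d ≤ 0 := by
    rcases (by omega : 1 ≤ d ∨ d ≤ 0) with hi | hi
    · exact Or.inl (mul_le_mul_of_nonneg_left hi (by omega))
    · exact Or.inr hi
  have h3 := stripLoop_fst_le n d 0
  exact (Int.toNat_lt_toNat (by omega)).mpr (by omega)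

-- outer loop: while d * d <= n: (strip d; total *= e + 1; d += 1), then the final n > 1 check
def ndLoop (n total d : Int) : Int :=
  if h : d * d ≤ n then
    ndLoop (stripLoop n d 0).1 (total * ((stripLoop n d 0).2 + 1)) (d + 1)
  else if 1 < n then total * 2 else total
termination_by (n + 1 - d).toNat
decreasing_by exact ndLoop_dec n d h

def numDivisors (n : Int) : Int :=
  if n ≤ 0 then 0
  else ndLoop n 1 2

def ex3FactorsSort_alt (arr : List Int) : List Int :=
  PySem.List.sorted2 arr numDivisors (fun x => x) false

-- ===== PRECONDITION & SPEC =====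
def Spec_ex3FactorsSort (arr : List Int) (out : List Int) : Prop := out = ex3FactorsSort_alt arr
instance (arr : List Int) (out : List Int) : Decidable (Spec_ex3FactorsSort arr out) := by unfold Spec_ex3FactorsSort; infer_instance

-- ===== CLAIM (what is proved, stated in full; the proofs are below) =====
def Claim_equal_ex3FactorsSort : Prop := ∀ (arr : List Int), Dom_ex3FactorsSort arr → Spec_ex3FactorsSort arr (ex3FactorsSort arr)

-- ===== LEMMAS AND PROOFS =====

-- contribution of candidate j to A's pair-counting loop over N
def contrib (N j : Nat) : Nat := if j ∣ N then (if j * j = N then 1 else 2) else 0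

theorem cfLoop_sum (n c i : Int) (hn : 1 ≤ n) :
    1 ≤ i → cfLoop n c i = c + (((Finset.Icc i.toNat (Nat.sqrt n.toNat)).sum (contrib n.toNat) : Nat) : Int) := by
  fun_induction cfLoop n c i
  case case1 c i h ih =>
    intro hi
    have e2 : ((n.toNat : Int)) = n := Int.toNat_of_nonneg (by omega)
    have e3 : ((i.toNat : Int)) = i := Int.toNat_of_nonneg (by omega)
    have e1 : ((i.toNat * i.toNat : Nat) : Int) = i * i := by push_cast [e3]; ring
    have hsq : i.toNat ≤ Nat.sqrt n.toNat := Nat.le_sqrt.mpr (by omega)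
    have hins : Finset.Icc i.toNat (Nat.sqrt n.toNat)
        = insert i.toNat (Finset.Icc (i.toNat + 1) (Nat.sqrt n.toNat)) := by
      ext x; simp [Finset.mem_Icc, Finset.mem_insert]; omega
    rw [hins, Finset.sum_insert (by simp)]
    simp only [dite_eq_ite] at ih
    rw [ih (by omega)]
    have e4 : (i + 1).toNat = i.toNat + 1 := by omega
    rw [e4]
    have hdvd : (PySem.Int.mod n i = 0) ↔ (i.toNat ∣ n.toNat) := by
      rw [PySem.Int.mod_eq_zero_iff_dvd, ← Int.natCast_dvd_natCast, e2, e3]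
    unfold contrib
    by_cases hd : i.toNat ∣ n.toNat
    · rw [if_pos hd, if_pos (hdvd.mpr hd)]
      by_cases hq : i.toNat * i.toNat = n.toNat
      · rw [if_pos hq, if_neg (by omega : ¬ i * i ≠ n)]
        push_cast; ring
      · rw [if_neg hq, if_pos (by omega : i * i ≠ n)]
        push_cast; ring
    · rw [if_neg hd, if_neg (fun hh => hd (hdvd.mp hh))]
      push_cast; ring
  case case2 c i h =>
    intro hi
    have e2 : ((n.toNat : Int)) = n := Int.toNat_of_nonneg (by omega)
    have e3 : ((i.toNat : Int)) = i := Int.toNat_of_nonneg (by omega)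
    have e1 : ((i.toNat * i.toNat : Nat) : Int) = i * i := by push_cast [e3]; ring
    have e1' : ((i.toNat ^ 2 : Nat) : Int) = i * i := by push_cast [e3]; ring
    have : Nat.sqrt n.toNat < i.toNat := Nat.sqrt_lt'.mpr (by omega)
    rw [Finset.Icc_eq_empty (by omega)]
    simp

theorem pairing_sum (N : Nat) (hN : 1 ≤ N) :
    (Finset.Icc 1 (Nat.sqrt N)).sum (contrib N) = N.divisors.card := by
  have hfil : (Finset.Icc 1 (Nat.sqrt N)).filter (fun j => j ∣ N)
      = N.divisors.filter (fun j => j * j ≤ N) := by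
    ext j
    simp only [Finset.mem_filter, Finset.mem_Icc, Nat.mem_divisors]
    constructor
    · rintro ⟨⟨h1, h2⟩, h3⟩
      exact ⟨⟨h3, by omega⟩, Nat.le_sqrt.mp h2⟩
    · rintro ⟨⟨h1, h2⟩, h3⟩
      exact ⟨⟨Nat.pos_of_dvd_of_pos h1 (by omega), Nat.le_sqrt.mpr h3⟩, h1⟩
  have step1 : (Finset.Icc 1 (Nat.sqrt N)).sum (contrib N)
      = (N.divisors.filter (fun j => j * j ≤ N)).sum (fun j => if j * j = N then 1 else 2) := by
    rw [← hfil, Finset.sum_filter]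
    exact Finset.sum_congr rfl (fun j _ => by unfold contrib; split_ifs <;> rfl)
  set A := N.divisors.filter (fun j => j * j ≤ N) with hA
  set B := N.divisors.filter (fun j => ¬ j * j ≤ N) with hB
  have step2 : A.sum (fun j => if j * j = N then 1 else 2)
      = A.card + (A.filter (fun j => ¬ j * j = N)).card := by
    have : ∀ j ∈ A, (if j * j = N then 1 else 2) = 1 + (if ¬ j * j = N then 1 else 0) := by
      intro j _; split_ifs <;> simp_all
    rw [Finset.sum_congr rfl this, Finset.sum_add_distrib, Finset.sum_const, Finset.sum_boole]
    simp
  have step3 : B.card = (A.filter (fun j => ¬ j * j = N)).card := by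
    apply Finset.card_nbij' (fun d => N / d) (fun d => N / d)
    · intro d hd
      simp only [hB, hA, Finset.coe_filter, Set.mem_setOf_eq, Nat.mem_divisors,
        Finset.mem_filter] at *
      obtain ⟨⟨hdvd, hN0⟩, hgt⟩ := hd
      have hdpos : 0 < d := Nat.pos_of_dvd_of_pos hdvd (by omega)
      have heq : d * (N / d) = N := Nat.mul_div_cancel' hdvd
      have hmpos : 0 < N / d := Nat.div_pos (Nat.le_of_dvd (by omega) hdvd) hdpos
      have hlt : N / d < d := by nlinarith
      have hsm : N / d * (N / d) < N := by nlinarith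
      exact ⟨⟨⟨Nat.div_dvd_of_dvd hdvd, hN0⟩, by omega⟩, by omega⟩
    · intro d hd
      simp only [hB, hA, Finset.coe_filter, Set.mem_setOf_eq, Nat.mem_divisors,
        Finset.mem_filter] at *
      obtain ⟨⟨⟨hdvd, hN0⟩, hle⟩, hne⟩ := hd
      have hdpos : 0 < d := Nat.pos_of_dvd_of_pos hdvd (by omega)
      have heq : d * (N / d) = N := Nat.mul_div_cancel' hdvd
      have hmpos : 0 < N / d := Nat.div_pos (Nat.le_of_dvd (by omega) hdvd) hdpos
      have hlt : d < N / d := by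
        rcases Nat.lt_or_ge d (N / d) with h | h
        · exact h
        · exfalso; have h2 := Nat.mul_le_mul_left d h; omega
      have hsm : ¬ (N / d * (N / d) ≤ N) := by nlinarith
      exact ⟨⟨Nat.div_dvd_of_dvd hdvd, hN0⟩, hsm⟩
    · intro d hd
      simp only [hB, Finset.coe_filter, Set.mem_setOf_eq, Nat.mem_divisors] at hd
      exact Nat.div_div_self hd.1.1 (by omega)
    · intro d hd
      simp only [hA, Finset.coe_filter, Set.mem_setOf_eq, Nat.mem_divisors, Finset.mem_filter] at hd
      exact Nat.div_div_self hd.1.1.1 (by omega)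
  have step4 : A.card + B.card = N.divisors.card :=
    Finset.card_filter_add_card_filter_not (fun j => j * j ≤ N)
  omega

theorem stripLoop_spec (n d e : Int) : 1 ≤ n → 2 ≤ d →
    ∃ k : Nat, stripLoop n d e = (n / d ^ k, e + k) ∧ (d ^ k ∣ n) ∧
      ¬ (d ∣ n / d ^ k) ∧ 1 ≤ n / d ^ k := by
  fun_induction stripLoop n d e
  case case1 n e h ih =>
    intro hn hd
    obtain ⟨h1, h2, h3⟩ := h
    have hdvd : d ∣ n := (PySem.Int.mod_eq_zero_iff_dvd n d).mp h1
    obtain ⟨c, rfl⟩ := hdvd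
    have hq : PySem.Int.floordiv (d * c) d = c := by
      rw [PySem.Int.floordiv_eq_ediv_of_pos (by omega)]
      exact Int.mul_ediv_cancel_left c (by omega)
    have hc : 1 ≤ c := by nlinarith
    rw [hq] at ih
    obtain ⟨k, hs, hdk, hnd, hpos⟩ := ih hc hd
    refine ⟨k + 1, ?_, ?_, ?_, ?_⟩
    · rw [hq, hs]
      have : d * c / d ^ (k + 1) = c / d ^ k := by
        rw [pow_succ']
        exact Int.mul_ediv_mul_of_pos c (d ^ k) (by omega)
      rw [this]
      have : e + 1 + (k : Int) = e + ((k : Nat) + 1 : Nat) := by push_cast; ring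
      rw [this]
    · rw [pow_succ']
      exact mul_dvd_mul_left d hdk
    · have : d * c / d ^ (k + 1) = c / d ^ k := by
        rw [pow_succ']; exact Int.mul_ediv_mul_of_pos c (d ^ k) (by omega)
      rw [this]; exact hnd
    · have : d * c / d ^ (k + 1) = c / d ^ k := by
        rw [pow_succ']; exact Int.mul_ediv_mul_of_pos c (d ^ k) (by omega)
      rw [this]; exact hpos
  case case2 n e h =>
    intro hn hd
    have hmod : PySem.Int.mod n d ≠ 0 := by
      intro hc; exact h ⟨hc, hn, hd⟩
    have hnd : ¬ d ∣ n := fun hc => hmod ((PySem.Int.mod_eq_zero_iff_dvd n d).mpr hc)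
    exact ⟨0, by simp, (by simp : d ^ 0 ∣ n), by simpa using hnd, by simp [hn]⟩

theorem ndLoop_spec (n total d : Int) : 1 ≤ n → 2 ≤ d →
    (∀ p : Nat, p.Prime → (p : Int) ∣ n → d ≤ (p : Int)) →
    ndLoop n total d = total * (n.toNat.divisors.card : Int) := by
  fun_induction ndLoop n total d
  case case1 n total d h ih =>
    intro hn hd hinv
    obtain ⟨k, hs, hdk, hnd, hpos⟩ := stripLoop_spec n d 0 hn hd
    rw [hs] at ih
    simp only [hs]
    rcases Nat.eq_zero_or_pos k with hk | hk
    · -- d does not divide n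
      subst hk
      simp only [pow_zero, Int.ediv_one] at ih hnd hpos ⊢
      have hinv' : ∀ p : Nat, p.Prime → (p : Int) ∣ n → d + 1 ≤ (p : Int) := by
        intro p pp hpn
        have h1 := hinv p pp hpn
        rcases lt_or_eq_of_le h1 with h2 | h2
        · omega
        · exfalso; exact hnd (h2 ▸ hpn)
      have := ih hn (by omega) hinv'
      simpa using this
    · -- d is prime, strip the full power
      set n' := n / d ^ k with hn'
      have hddvd : d ∣ n := dvd_trans (dvd_pow_self d (by omega)) hdk
      have hcast_d : ((d.toNat : Int)) = d := Int.toNat_of_nonneg (by omega)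
      have hq2 : 2 ≤ d.toNat := by omega
      -- d.toNat is prime
      have hqprime : d.toNat.Prime := by
        set q := d.toNat with hqdef
        have pp : q.minFac.Prime := Nat.minFac_prime (by omega)
        have hdvdq : (q.minFac : Int) ∣ d := by
          rw [← hcast_d]
          exact_mod_cast Int.natCast_dvd_natCast.mpr (Nat.minFac_dvd q)
        have h1 := hinv q.minFac pp (dvd_trans hdvdq hddvd)
        have h2 : q.minFac ≤ q := Nat.minFac_le (by omega)
        have h3 : q = q.minFac := by omega
        rw [h3]; exact pp
      -- Nat-level decomposition
      have hmul : d ^ k * n' = n := Int.mul_ediv_cancel' hdk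
      have hn'nn : ((n'.toNat : Int)) = n' := Int.toNat_of_nonneg (by omega)
      have hNdecomp : n.toNat = d.toNat ^ k * n'.toNat := by
        have : ((d.toNat ^ k * n'.toNat : Nat) : Int) = n := by
          push_cast [hcast_d, hn'nn]; exact hmul
        omega
      have hndN : ¬ d.toNat ∣ n'.toNat := by
        intro hc
        apply hnd
        have hcc : (d.toNat : Int) ∣ (n'.toNat : Int) := Int.natCast_dvd_natCast.mpr hc
        rwa [hcast_d, hn'nn] at hcc
      have hcop : Nat.Coprime (d.toNat ^ k) n'.toNat :=
        Nat.Coprime.pow_left k ((Nat.Prime.coprime_iff_not_dvd hqprime).mpr hndN)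
      have htau : n.toNat.divisors.card = (k + 1) * n'.toNat.divisors.card := by
        rw [hNdecomp, Nat.Coprime.card_divisors_mul hcop]
        congr 1
        rw [Nat.divisors_prime_pow hqprime]
        simp
      have hinv' : ∀ p : Nat, p.Prime → (p : Int) ∣ n' → d + 1 ≤ (p : Int) := by
        intro p pp hpn'
        have hpn : (p : Int) ∣ n := by
          rw [← hmul]; exact Dvd.dvd.mul_left hpn' _
        have h1 := hinv p pp hpn
        rcases lt_or_eq_of_le h1 with h2 | h2
        · omega
        · exfalso; exact hnd (h2 ▸ hpn')
      have hrec := ih hpos (by omega) hinv'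
      rw [hrec, htau]
      push_cast
      ring
  case case2 n total d h h1 =>
    intro hn hd hinv
    · -- n.toNat is prime
      set N := n.toNat with hN
      have hcast : ((N : Int)) = n := Int.toNat_of_nonneg (by omega)
      have hN2 : 2 ≤ N := by omega
      have pp : N.minFac.Prime := Nat.minFac_prime (by omega)
      have hpdvd : N.minFac ∣ N := Nat.minFac_dvd N
      have hpInt : ((N.minFac : Int)) ∣ n := by
        rw [← hcast]; exact_mod_cast Int.natCast_dvd_natCast.mpr hpdvd
      have hdp := hinv N.minFac pp hpInt
      have hdpN : d.toNat ≤ N.minFac := by omega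
      have hNlt : N < d.toNat * d.toNat := by
        have : n < d * d := by omega
        have hdt : ((d.toNat : Int)) = d := Int.toNat_of_nonneg (by omega)
        have : ((N : Int)) < (d.toNat : Int) * (d.toNat : Int) := by rw [hdt, hcast]; omega
        exact_mod_cast this
      set M := N / N.minFac with hM
      have hMeq : N.minFac * M = N := Nat.mul_div_cancel' hpdvd
      have hM1 : 1 ≤ M := Nat.div_pos (Nat.minFac_le (by omega)) pp.pos
      have hMlt : M < d.toNat := by
        have hle : N.minFac * M < N.minFac * d.toNat := by
          calc N.minFac * M = N := hMeq
          _ < d.toNat * d.toNat := hNlt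
          _ ≤ N.minFac * d.toNat := Nat.mul_le_mul_right _ hdpN
        exact Nat.lt_of_mul_lt_mul_left hle
      have hMone : M = 1 := by
        by_contra hc
        have hM2 : 2 ≤ M := by omega
        have ppM : M.minFac.Prime := Nat.minFac_prime (by omega)
        have hq : M.minFac ∣ N := dvd_trans (Nat.minFac_dvd M) (Dvd.intro_left _ hMeq)
        have hqInt : ((M.minFac : Int)) ∣ n := by
          rw [← hcast]; exact_mod_cast Int.natCast_dvd_natCast.mpr hq
        have h5 := hinv M.minFac ppM hqInt
        have h6 : M.minFac ≤ M := Nat.minFac_le (by omega)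
        omega
      have hNprime : N.Prime := by
        have hNe : N.minFac = N := by have h7 := hMeq; rw [hMone, Nat.mul_one] at h7; exact h7
        rwa [hNe] at pp
      rw [Nat.Prime.divisors hNprime]
      rw [Finset.card_insert_of_notMem (by simp [Finset.mem_singleton]; omega)]
      simp
  case case3 n total d h h1 =>
    intro hn hd hinv
    have : n = 1 := by omega
    subst this
    simp

theorem countFactors_eq_tau (n : Int) (hn : 1 ≤ n) :
    countFactors n = (n.toNat.divisors.card : Int) := by
  unfold countFactors
  rw [cfLoop_sum n 0 1 hn (le_refl 1)]
  have h1 : ((1 : Int)).toNat = 1 := rfl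
  rw [h1, pairing_sum n.toNat (by omega)]
  omega

theorem countFactors_nonpos (n : Int) (hn : n ≤ 0) : countFactors n = 0 := by
  unfold countFactors
  rw [cfLoop]
  rw [dif_neg (by nlinarith : ¬ (1 : Int) * 1 ≤ n)]

theorem numDivisors_eq_countFactors (n : Int) : numDivisors n = countFactors n := by
  by_cases hn : n ≤ 0
  · unfold numDivisors
    rw [if_pos hn, countFactors_nonpos n hn]
  · unfold numDivisors
    rw [if_neg hn]
    rw [ndLoop_spec n 1 2 (by omega) (le_refl 2)
      (fun p pp _ => by exact_mod_cast pp.two_le)]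
    rw [countFactors_eq_tau n (by omega)]
    ring

-- ===== VERDICT (by name: the statement is the Claim_ definition above) =====
theorem ex3FactorsSort_spec : Claim_equal_ex3FactorsSort := by
  intro arr _
  unfold Spec_ex3FactorsSort ex3FactorsSort ex3FactorsSort_alt PySem.List.sorted2
  simp only [Bool.false_eq_true, if_false]
  have h : (fun a b : Int => decide (cfCompare a b < 0))
      = (fun a b : Int => decide (numDivisors a < numDivisors b) ||
          (!decide (numDivisors b < numDivisors a) && decide (a < b))) := by
    funext a b
    simp only [cfCompare, numDivisors_eq_countFactors]
    by_cases hc : countFactors a = countFactors b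
    · simp [hc]
    · rcases lt_or_gt_of_ne hc with h2 | h2
      · simp [hc, h2]
      · simp [hc, h2, not_lt_of_gt h2]
  rw [h]
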